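-- pv_equiv track=rewrite | github.com/sisbell/agentic-reasoning-lattice | scripts/lib/formalization/formalize/produce_contract.py | _find_dirty
-- ===== SOURCE A (Python) =====
-- def _find_dirty(current_hashes, stored_hashes, deps_data):
--     """Find properties that are dirty (changed or dependency changed).
--
--     Returns set of dirty labels.
--     """
--     dirty = set()
--
--     # First pass: mark directly changed
--     for label, current in current_hashes.items():
--         stored = stored_hashes.get(label)
--         if stored is None or stored != current:
--             dirty.add(label)
--
--     # Transitive pass: mark dependents of dirty properties
--     changed = True
--     while changed:
--         changed = False
--         for label, prop in deps_data.get("properties", {}).items():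
--             if label in dirty:
--                 continue
--             follows = set(prop.get("follows_from", []))
--             if follows & dirty:
--                 dirty.add(label)
--                 changed = True
--
--     return dirty
-- ===== SOURCE B (Python) =====
-- def _find_dirty(current_hashes, stored_hashes, deps_data):
--     """Worklist propagation over a reverse-dependency index (one pass per edge)."""
--     dirty = set()
--     stack = []
--     for label, current in current_hashes.items():
--         if stored_hashes.get(label) != current:
--             dirty.add(label)
--             stack.append(label)
--     rev = {}
--     for label, prop in deps_data.get("properties", {}).items():
--         for f in prop.get("follows_from", []):
--             rev.setdefault(f, []).append(label)
--     while stack: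
--         d = stack.pop()
--         for lab in rev.get(d, []):
--             if lab not in dirty:
--                 dirty.add(lab)
--                 stack.append(lab)
--     return dirty
-- ===== Notes on version B (the rewrite author's own statement) =====
-- stated objective: alternative
-- what changed: A repeatedly re-scans the whole properties table until a sweep makes no change; B builds a reverse-dependency index once and propagates dirtiness with a worklist, so each edge is examined at most once after its source becomes dirty.
import Mathlib
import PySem

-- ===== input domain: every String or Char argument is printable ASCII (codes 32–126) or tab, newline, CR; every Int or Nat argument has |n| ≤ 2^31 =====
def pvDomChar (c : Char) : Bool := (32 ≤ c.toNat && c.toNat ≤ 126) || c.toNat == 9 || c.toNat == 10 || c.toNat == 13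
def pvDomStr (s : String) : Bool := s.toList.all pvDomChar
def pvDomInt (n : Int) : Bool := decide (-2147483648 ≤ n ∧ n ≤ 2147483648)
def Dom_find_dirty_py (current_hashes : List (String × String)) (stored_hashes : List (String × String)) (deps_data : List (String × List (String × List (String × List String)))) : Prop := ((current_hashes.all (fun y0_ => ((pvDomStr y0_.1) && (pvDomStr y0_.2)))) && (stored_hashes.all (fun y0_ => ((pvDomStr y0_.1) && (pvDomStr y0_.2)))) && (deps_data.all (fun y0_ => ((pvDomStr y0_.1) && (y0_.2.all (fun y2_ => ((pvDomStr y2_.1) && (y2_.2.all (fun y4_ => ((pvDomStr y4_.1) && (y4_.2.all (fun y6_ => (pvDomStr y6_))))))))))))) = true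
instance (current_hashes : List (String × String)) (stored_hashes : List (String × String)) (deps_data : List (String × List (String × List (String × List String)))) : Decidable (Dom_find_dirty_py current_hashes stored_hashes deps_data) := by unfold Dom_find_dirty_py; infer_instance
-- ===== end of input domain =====

-- B replaces A's repeated full sweeps over the property table (sweep until no change)
-- by a worklist propagation over a reverse-dependency index built once, so each
-- dependency edge is examined at most once after a node first becomes dirty.
-- Both Pythons return a SET of labels (unordered); both ports return its elements in
-- sorted order, the canonical list representation of that set.

-- shared scaffolding (identical dict-access expressions in both Pythons)
-- prop.get("follows_from", [])
def fdFollows (prop : List (String × List String)) : List String :=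
  (PySem.Dict.ofList prop).getD "follows_from" []

-- deps_data.get("properties", {}).items()
def fdProps (deps_data : List (String × List (String × List (String × List String)))) :
    List (String × List (String × List String)) :=
  (PySem.Dict.ofList ((PySem.Dict.ofList deps_data).getD "properties" [])).items

-- ===== PORT A =====
-- first pass: mark directly changed
def fdFirstPass (current_hashes stored_hashes : List (String × String)) : PySem.Set String :=
  (PySem.Dict.ofList current_hashes).items.foldl
    (fun dirty lc =>
      match (PySem.Dict.ofList stored_hashes).get? lc.1 with
      | none => PySem.Set.add dirty lc.1
      | some stored => if stored ≠ lc.2 then PySem.Set.add dirty lc.1 else dirty)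
    PySem.Set.empty

-- one body of A's `while changed` loop: state = (dirty, changed)
def fdSweep (props : List (String × List (String × List String))) (dirty : PySem.Set String) :
    PySem.Set String × Bool :=
  props.foldl
    (fun st lp =>
      if PySem.Set.contains st.1 lp.1 then st
      else if PySem.Set.inter (PySem.Set.ofList (fdFollows lp.2)) st.1 ≠ [] then
        (PySem.Set.add st.1 lp.1, true)
      else st)
    (dirty, false)

-- A's `while changed` loop; each continuing round strictly grows `dirty` by a key of
-- `props`, so `props.length + 1` rounds always reach the unchanged round (proved below).
def fdLoop (props : List (String × List (String × List String))) :
    Nat → PySem.Set String → PySem.Set String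
  | 0, dirty => dirty
  | n + 1, dirty =>
    let r := fdSweep props dirty
    if r.2 then fdLoop props n r.1 else r.1

def find_dirty_py (current_hashes : List (String × String)) (stored_hashes : List (String × String)) (deps_data : List (String × List (String × List (String × List String)))) : List String :=
  let props := fdProps deps_data
  PySem.List.sorted (fdLoop props (props.length + 1) (fdFirstPass current_hashes stored_hashes))
    (fun x => x) false

-- ===== PORT B =====
-- B's first pass builds the dirty set and the initial worklist together
def fdInit (current_hashes stored_hashes : List (String × String)) :
    PySem.Set String × List String :=
  (PySem.Dict.ofList current_hashes).items.foldl
    (fun st lc =>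
      if (PySem.Dict.ofList stored_hashes).get? lc.1 ≠ some lc.2 then
        (PySem.Set.add st.1 lc.1, st.2 ++ [lc.1])
      else st)
    (PySem.Set.empty, [])

-- reverse-dependency index: rev[f] = labels whose follows_from contains f
def fdRev (props : List (String × List (String × List String))) :
    PySem.Dict String (List String) :=
  props.foldl
    (fun rev lp =>
      (fdFollows lp.2).foldl (fun rev f => rev.modify f [] (· ++ [lp.1])) rev)
    PySem.Dict.empty

-- B's `while stack` loop (stack head = Python's stack top); every element is pushed at
-- most once, so `|stack| + props.length` pops empty the worklist (proved below).
def fdWork (rev : PySem.Dict String (List String)) :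
    Nat → PySem.Set String → List String → PySem.Set String
  | 0, dirty, _ => dirty
  | _ + 1, dirty, [] => dirty
  | n + 1, dirty, d :: rest =>
    let st := (rev.getD d []).foldl
      (fun st lab =>
        if PySem.Set.contains st.1 lab then st
        else (PySem.Set.add st.1 lab, st.2 ++ [lab]))
      (dirty, ([] : List String))
    fdWork rev n st.1 (st.2.reverse ++ rest)

def find_dirty_py_alt (current_hashes : List (String × String)) (stored_hashes : List (String × String)) (deps_data : List (String × List (String × List (String × List String)))) : List String :=
  let props := fdProps deps_data
  let init := fdInit current_hashes stored_hashes
  PySem.List.sorted (fdWork (fdRev props) (init.2.length + props.length + 1) init.1 init.2)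
    (fun x => x) false

-- ===== PRECONDITION & SPEC =====
def Spec_find_dirty_py (current_hashes : List (String × String)) (stored_hashes : List (String × String)) (deps_data : List (String × List (String × List (String × List String)))) (out : List String) : Prop := out = find_dirty_py_alt current_hashes stored_hashes deps_data
instance (current_hashes : List (String × String)) (stored_hashes : List (String × String)) (deps_data : List (String × List (String × List (String × List String)))) (out : List String) : Decidable (Spec_find_dirty_py current_hashes stored_hashes deps_data out) := by unfold Spec_find_dirty_py; infer_instance

-- ===== CLAIM (what is proved, stated in full; the proofs are below) =====
def Claim_equal_find_dirty_py : Prop := ∀ (current_hashes : List (String × String)) (stored_hashes : List (String × String)) (deps_data : List (String × List (String × List (String × List String)))), Dom_find_dirty_py current_hashes stored_hashes deps_data → Spec_find_dirty_py current_hashes stored_hashes deps_data (find_dirty_py current_hashes stored_hashes deps_data)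

-- ===== LEMMAS AND PROOFS =====

-- the least set containing the directly-dirty labels and closed under "some dependency is dirty"
inductive FdCl (dirty0 : List String) (props : List (String × List (String × List String))) : String → Prop
  | base {x : String} : x ∈ dirty0 → FdCl dirty0 props x
  | step {lp : String × List (String × List String)} {f : String} :
      lp ∈ props → f ∈ fdFollows lp.2 → FdCl dirty0 props f → FdCl dirty0 props lp.1

-- number of props keys not yet dirty (the variant of both fixpoint loops)
def fdMissing (keys : List String) (dirty : PySem.Set String) : Nat :=
  keys.countP (fun k => !(PySem.Set.contains dirty k))

theorem fdMissing_le (keys : List String) (dirty : PySem.Set String) :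
    fdMissing keys dirty ≤ keys.length := List.countP_le_length

theorem fdMissing_mono (keys : List String) (d d' : PySem.Set String)
    (h : ∀ x ∈ d, x ∈ d') : fdMissing keys d' ≤ fdMissing keys d := by
  unfold fdMissing
  apply List.countP_mono_left
  intro k _ hk
  simp only [Bool.not_eq_true'] at hk ⊢
  cases hc : PySem.Set.contains d k
  · rfl
  · have := (PySem.Set.contains_iff d' k).mpr (h k ((PySem.Set.contains_iff d k).mp hc))
    rw [hk] at this
    cases this

theorem fdMissing_lt (keys : List String) (d d' : PySem.Set String)
    (h : ∀ x ∈ d, x ∈ d') (l : String) (hl : l ∈ keys) (hld : l ∉ d) (hld' : l ∈ d') :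
    fdMissing keys d' < fdMissing keys d := by
  induction keys with
  | nil => cases hl
  | cons a t ih =>
    unfold fdMissing at *
    rw [List.countP_cons, List.countP_cons]
    have z0 : ∀ b : Bool, b = false → (if b = true then 1 else 0) = 0 := by
      intro b hb; rw [hb]; rfl
    have z1 : ∀ b : Bool, b = true → (if b = true then 1 else 0) = 1 := by
      intro b hb; rw [hb]; rfl
    rcases List.mem_cons.mp hl with rfl | hlt
    · have h1 : (!PySem.Set.contains d' l) = false := by
        rw [(PySem.Set.contains_iff d' l).mpr hld']; rfl
      have h2 : (!PySem.Set.contains d l) = true := by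
        cases hc : PySem.Set.contains d l
        · rfl
        · exact absurd ((PySem.Set.contains_iff d l).mp hc) hld
      rw [z0 _ h1, z1 _ h2]
      have hm := fdMissing_mono t d d' h
      unfold fdMissing at hm
      omega
    · have hh := ih hlt
      have e1 : (if (!false) = true then (1 : Nat) else 0) = 1 := rfl
      have e0 : (if (!true) = true then (1 : Nat) else 0) = 0 := rfl
      cases hc : PySem.Set.contains d a
      · cases hc' : PySem.Set.contains d' a
        · rw [e1]; omega
        · rw [e0, e1]; omega
      · have hca : PySem.Set.contains d' a = true :=
          (PySem.Set.contains_iff d' a).mpr (h a ((PySem.Set.contains_iff d a).mp hc))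
        rw [hca, e0]; omega

-- ---- A side: facts about one sweep ----

def fdStepA (st : PySem.Set String × Bool) (lp : String × List (String × List String)) :
    PySem.Set String × Bool :=
  if PySem.Set.contains st.1 lp.1 then st
  else if PySem.Set.inter (PySem.Set.ofList (fdFollows lp.2)) st.1 ≠ [] then
    (PySem.Set.add st.1 lp.1, true)
  else st

theorem fdSweep_eq (props : List (String × List (String × List String)))
    (dirty : PySem.Set String) : fdSweep props dirty = props.foldl fdStepA (dirty, false) := rfl

theorem fdStepA_spec (st : PySem.Set String × Bool) (lp : String × List (String × List String)) :
    (fdStepA st lp = st ∧ (lp.1 ∈ st.1 ∨ ∀ f ∈ fdFollows lp.2, f ∉ st.1))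
    ∨ (fdStepA st lp = (PySem.Set.add st.1 lp.1, true) ∧ lp.1 ∉ st.1 ∧
        ∃ f ∈ fdFollows lp.2, f ∈ st.1) := by
  unfold fdStepA
  by_cases h1 : PySem.Set.contains st.1 lp.1 = true
  · rw [if_pos h1]
    exact Or.inl ⟨rfl, Or.inl ((PySem.Set.contains_iff _ _).mp h1)⟩
  · rw [if_neg h1]
    by_cases h2 : PySem.Set.inter (PySem.Set.ofList (fdFollows lp.2)) st.1 ≠ []
    · rw [if_pos h2]
      refine Or.inr ⟨rfl, fun hx => h1 ((PySem.Set.contains_iff _ _).mpr hx), ?_⟩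
      obtain ⟨y, hy⟩ := List.exists_mem_of_ne_nil _ h2
      have hy' := (PySem.Set.mem_inter _ _ _).mp hy
      exact ⟨y, (PySem.Set.mem_ofList _ _).mp hy'.1, hy'.2⟩
    · rw [if_neg h2]
      rw [not_not] at h2
      refine Or.inl ⟨rfl, Or.inr fun f hf hfst => ?_⟩
      have : f ∈ PySem.Set.inter (PySem.Set.ofList (fdFollows lp.2)) st.1 :=
        (PySem.Set.mem_inter _ _ _).mpr ⟨(PySem.Set.mem_ofList _ _).mpr hf, hfst⟩
      rw [h2] at this
      cases this

theorem foldA_mono (props : List (String × List (String × List String))) :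
    ∀ st : PySem.Set String × Bool, ∀ x ∈ st.1, x ∈ (props.foldl fdStepA st).1 := by
  induction props with
  | nil => intro st x hx; simpa using hx
  | cons lp t ih =>
    intro st x hx
    rw [List.foldl_cons]
    apply ih
    rcases fdStepA_spec st lp with ⟨he, -⟩ | ⟨he, -, -⟩ <;> rw [he]
    · exact hx
    · exact (PySem.Set.mem_add _ _ _).mpr (Or.inl hx)

theorem foldA_true (props : List (String × List (String × List String))) :
    ∀ st : PySem.Set String × Bool, st.2 = true → (props.foldl fdStepA st).2 = true := by
  induction props with
  | nil => intro st h; simpa using h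
  | cons lp t ih =>
    intro st h
    rw [List.foldl_cons]
    apply ih
    rcases fdStepA_spec st lp with ⟨he, -⟩ | ⟨he, -, -⟩ <;> rw [he] <;>
      first | rfl | exact h

theorem foldA_unchanged (props : List (String × List (String × List String))) :
    ∀ st : PySem.Set String × Bool, (props.foldl fdStepA st).2 = false →
      (props.foldl fdStepA st).1 = st.1 ∧
      (∀ lp ∈ props, lp.1 ∈ st.1 ∨ ∀ f ∈ fdFollows lp.2, f ∉ st.1) := by
  induction props with
  | nil => intro st _; exact ⟨rfl, by simp⟩
  | cons lp t ih =>
    intro st h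
    rw [List.foldl_cons] at h ⊢
    rcases fdStepA_spec st lp with ⟨he, hr⟩ | ⟨he, -, -⟩
    · rw [he] at h ⊢
      obtain ⟨h1, h2⟩ := ih st h
      refine ⟨h1, fun lp' hlp' => ?_⟩
      rcases List.mem_cons.mp hlp' with rfl | h'
      · exact hr
      · exact h2 lp' h'
    · exfalso
      rw [he] at h
      have := foldA_true t (PySem.Set.add st.1 lp.1, true) rfl
      rw [this] at h
      cases h

theorem foldA_changed (props : List (String × List (String × List String))) :
    ∀ st : PySem.Set String × Bool, st.2 = false → (props.foldl fdStepA st).2 = true →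
      ∃ lp ∈ props, lp.1 ∉ st.1 ∧ lp.1 ∈ (props.foldl fdStepA st).1 := by
  induction props with
  | nil =>
    intro st h0 h1
    rw [List.foldl_nil] at h1
    rw [h0] at h1
    cases h1
  | cons lp t ih =>
    intro st h0 h1
    rw [List.foldl_cons] at h1 ⊢
    rcases fdStepA_spec st lp with ⟨he, -⟩ | ⟨he, hnot, -⟩
    · rw [he] at h1 ⊢
      obtain ⟨lp', hlp', hn, hm⟩ := ih st h0 h1
      exact ⟨lp', List.mem_cons_of_mem _ hlp', hn, hm⟩
    · rw [he]
      refine ⟨lp, List.mem_cons_self .., hnot, ?_⟩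
      exact foldA_mono t _ _ ((PySem.Set.mem_add _ _ _).mpr (Or.inr rfl))

theorem foldA_sound (C : String → Prop) (props : List (String × List (String × List String)))
    (hstep : ∀ lp ∈ props, (∃ f ∈ fdFollows lp.2, C f) → C lp.1) :
    ∀ st : PySem.Set String × Bool, (∀ x ∈ st.1, C x) →
      ∀ x ∈ (props.foldl fdStepA st).1, C x := by
  induction props with
  | nil => intro st h x hx; exact h x (by simpa using hx)
  | cons lp t ih =>
    intro st h
    rw [List.foldl_cons]
    apply ih (fun lp' hlp' => hstep lp' (List.mem_cons_of_mem _ hlp'))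
    rcases fdStepA_spec st lp with ⟨he, -⟩ | ⟨he, -, f, hf, hfst⟩ <;> rw [he]
    · exact h
    · intro x hx
      rcases (PySem.Set.mem_add _ _ _).mp hx with hx | rfl
      · exact h x hx
      · exact hstep lp (List.mem_cons_self ..) ⟨f, hf, h f hfst⟩

theorem foldA_nodup (props : List (String × List (String × List String))) :
    ∀ st : PySem.Set String × Bool, st.1.Nodup → (props.foldl fdStepA st).1.Nodup := by
  induction props with
  | nil => intro st h; simpa using h
  | cons lp t ih =>
    intro st h
    rw [List.foldl_cons]
    apply ih
    rcases fdStepA_spec st lp with ⟨he, -⟩ | ⟨he, -, -⟩ <;> rw [he]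
    · exact h
    · exact PySem.Set.nodup_add _ _ h

-- ---- A side: facts about the while-loop ----

theorem fdLoop_succ (props : List (String × List (String × List String))) (n : Nat)
    (dirty : PySem.Set String) :
    fdLoop props (n + 1) dirty =
      if (fdSweep props dirty).2 then fdLoop props n (fdSweep props dirty).1
      else (fdSweep props dirty).1 := rfl

theorem fdLoop_mono (props : List (String × List (String × List String))) :
    ∀ n (dirty : PySem.Set String), ∀ x ∈ dirty, x ∈ fdLoop props n dirty := by
  intro n
  induction n with
  | zero => intro dirty x hx; exact hx
  | succ n ih =>
    intro dirty x hx
    rw [fdLoop_succ]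
    have hx1 : x ∈ (fdSweep props dirty).1 := by
      rw [fdSweep_eq]; exact foldA_mono props (dirty, false) x hx
    cases hr : (fdSweep props dirty).2
    · rw [if_neg (by simp)]; exact hx1
    · rw [if_pos rfl]; exact ih _ x hx1

theorem fdLoop_sound (C : String → Prop) (props : List (String × List (String × List String)))
    (hstep : ∀ lp ∈ props, (∃ f ∈ fdFollows lp.2, C f) → C lp.1) :
    ∀ n (dirty : PySem.Set String), (∀ x ∈ dirty, C x) →
      ∀ x ∈ fdLoop props n dirty, C x := by
  intro n
  induction n with
  | zero => intro dirty h x hx; exact h x hx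
  | succ n ih =>
    intro dirty h x hx
    rw [fdLoop_succ] at hx
    have hsw : ∀ y ∈ (fdSweep props dirty).1, C y := by
      rw [fdSweep_eq]; exact foldA_sound C props hstep (dirty, false) h
    cases hr : (fdSweep props dirty).2
    · rw [hr, if_neg (by simp)] at hx; exact hsw x hx
    · rw [hr, if_pos rfl] at hx; exact ih _ hsw x hx

theorem fdLoop_closed (props : List (String × List (String × List String))) :
    ∀ n (dirty : PySem.Set String), fdMissing (props.map Prod.fst) dirty ≤ n →
      ∀ lp ∈ props, lp.1 ∈ fdLoop props (n + 1) dirty ∨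
        ∀ f ∈ fdFollows lp.2, f ∉ fdLoop props (n + 1) dirty := by
  have hunch : ∀ n (dirty : PySem.Set String), (fdSweep props dirty).2 = false →
      fdLoop props (n + 1) dirty = dirty ∧
      (∀ lp ∈ props, lp.1 ∈ dirty ∨ ∀ f ∈ fdFollows lp.2, f ∉ dirty) := by
    intro n dirty hr
    obtain ⟨h1, h2⟩ := foldA_unchanged props (dirty, false) (by rw [← fdSweep_eq]; exact hr)
    refine ⟨?_, h2⟩
    rw [fdLoop_succ, hr, if_neg (by simp), fdSweep_eq, h1]
  intro n
  induction n with
  | zero =>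
    intro dirty hm lp hlp
    cases hr : (fdSweep props dirty).2
    · obtain ⟨he, h2⟩ := hunch 0 dirty hr
      rw [he]
      exact h2 lp hlp
    · exfalso
      obtain ⟨lp', hlp', hn, -⟩ :=
        foldA_changed props (dirty, false) rfl (by rw [← fdSweep_eq]; exact hr)
      have hbc : (!PySem.Set.contains dirty lp'.1) = true := by
        cases hc : PySem.Set.contains dirty lp'.1
        · rfl
        · exact absurd ((PySem.Set.contains_iff dirty lp'.1).mp hc) hn
      have hpos : 0 < fdMissing (props.map Prod.fst) dirty := by
        unfold fdMissing
        exact List.countP_pos_iff.mpr ⟨lp'.1, List.mem_map.mpr ⟨lp', hlp', rfl⟩, hbc⟩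
      omega
  | succ n ih =>
    intro dirty hm lp hlp
    cases hr : (fdSweep props dirty).2
    · obtain ⟨he, h2⟩ := hunch (n + 1) dirty hr
      rw [he]
      exact h2 lp hlp
    · obtain ⟨lp', hlp', hn, hin⟩ :=
        foldA_changed props (dirty, false) rfl (by rw [← fdSweep_eq]; exact hr)
      have hsub : ∀ x ∈ dirty, x ∈ (fdSweep props dirty).1 := by
        rw [fdSweep_eq]; exact fun x hx => foldA_mono props (dirty, false) x hx
      have hlt := fdMissing_lt (props.map Prod.fst) dirty (fdSweep props dirty).1 hsub lp'.1
        (List.mem_map.mpr ⟨lp', hlp', rfl⟩) hn (by rw [fdSweep_eq]; exact hin)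
      have := ih (fdSweep props dirty).1 (by omega) lp hlp
      rw [fdLoop_succ, hr, if_pos rfl]
      exact this

theorem fdLoop_nodup (props : List (String × List (String × List String))) :
    ∀ n (dirty : PySem.Set String), dirty.Nodup → (fdLoop props n dirty).Nodup := by
  intro n
  induction n with
  | zero => intro dirty h; exact h
  | succ n ih =>
    intro dirty h
    rw [fdLoop_succ]
    have hsw : (fdSweep props dirty).1.Nodup := by
      rw [fdSweep_eq]; exact foldA_nodup props (dirty, false) h
    cases hr : (fdSweep props dirty).2
    · rw [if_neg (by simp)]; exact hsw
    · rw [if_pos rfl]; exact ih _ hsw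

-- ---- first passes agree ----

theorem fdInit_fst (cur sto : List (String × String)) :
    (fdInit cur sto).1 = fdFirstPass cur sto := by
  unfold fdInit fdFirstPass
  suffices h : ∀ (l : List (String × String)) (s : PySem.Set String) (stk : List String),
      (l.foldl (fun st lc =>
        if (PySem.Dict.ofList sto).get? lc.1 ≠ some lc.2 then
          (PySem.Set.add st.1 lc.1, st.2 ++ [lc.1])
        else st) (s, stk)).1
      = l.foldl (fun dirty lc =>
          match (PySem.Dict.ofList sto).get? lc.1 with
          | none => PySem.Set.add dirty lc.1
          | some stored => if stored ≠ lc.2 then PySem.Set.add dirty lc.1 else dirty) s by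
    exact h _ _ _
  intro l
  induction l with
  | nil => intro s stk; rfl
  | cons lc t ih =>
    intro s stk
    rw [List.foldl_cons, List.foldl_cons]
    cases hg : (PySem.Dict.ofList sto).get? lc.1 with
    | none =>
      rw [if_pos (by simp [hg])]
      exact ih _ _
    | some stored =>
      simp only [hg]
      by_cases he : stored = lc.2
      · subst he
        rw [if_neg (by simp), if_neg (by simp)]
        exact ih _ _
      · rw [if_pos (by simpa using he), if_pos he]
        exact ih _ _

theorem fdInit_mem_iff (cur sto : List (String × String)) :
    ∀ x, x ∈ (fdInit cur sto).1 ↔ x ∈ (fdInit cur sto).2 := by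
  unfold fdInit
  suffices h : ∀ (l : List (String × String)) (st : PySem.Set String × List String),
      (∀ x, x ∈ st.1 ↔ x ∈ st.2) →
      ∀ x, x ∈ (l.foldl (fun st lc =>
        if (PySem.Dict.ofList sto).get? lc.1 ≠ some lc.2 then
          (PySem.Set.add st.1 lc.1, st.2 ++ [lc.1])
        else st) st).1 ↔ x ∈ (l.foldl (fun st lc =>
        if (PySem.Dict.ofList sto).get? lc.1 ≠ some lc.2 then
          (PySem.Set.add st.1 lc.1, st.2 ++ [lc.1])
        else st) st).2 by
    exact h _ _ (fun x => Iff.rfl)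
  intro l
  induction l with
  | nil => intro st h x; exact h x
  | cons lc t ih =>
    intro st h x
    rw [List.foldl_cons]
    apply ih
    intro y
    by_cases hc : (PySem.Dict.ofList sto).get? lc.1 ≠ some lc.2
    · rw [if_pos hc]
      constructor
      · intro hy
        rcases (PySem.Set.mem_add _ _ _).mp hy with hy | rfl
        · exact List.mem_append_left _ ((h y).mp hy)
        · exact List.mem_append_right _ (List.mem_singleton_self _)
      · intro hy
        rcases List.mem_append.mp hy with hy | hy
        · exact (PySem.Set.mem_add _ _ _).mpr (Or.inl ((h y).mpr hy))
        · exact (PySem.Set.mem_add _ _ _).mpr (Or.inr (List.mem_singleton.mp hy))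
    · rw [if_neg hc]; exact h y

-- ---- B side: facts about the inner push loop ----

def fdStepB (st : PySem.Set String × List String) (lab : String) :
    PySem.Set String × List String :=
  if PySem.Set.contains st.1 lab then st else (PySem.Set.add st.1 lab, st.2 ++ [lab])

theorem fdStepB_spec (st : PySem.Set String × List String) (lab : String) :
    (fdStepB st lab = st ∧ lab ∈ st.1) ∨
    (lab ∉ st.1 ∧ fdStepB st lab = (PySem.Set.add st.1 lab, st.2 ++ [lab])) := by
  unfold fdStepB
  by_cases hc : PySem.Set.contains st.1 lab = true
  · exact Or.inl ⟨if_pos hc, (PySem.Set.contains_iff _ _).mp hc⟩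
  · exact Or.inr ⟨fun hx => hc ((PySem.Set.contains_iff _ _).mpr hx), if_neg hc⟩

theorem foldB_fst_mem (L : List String) :
    ∀ st : PySem.Set String × List String, ∀ x,
      (x ∈ (L.foldl fdStepB st).1 ↔ x ∈ st.1 ∨ x ∈ L) := by
  induction L with
  | nil => intro st x; simp
  | cons lab t ih =>
    intro st x
    rw [List.foldl_cons]
    rcases fdStepB_spec st lab with ⟨he, hm⟩ | ⟨hn, he⟩ <;> rw [he, ih]
    · simp only [List.mem_cons]
      constructor
      · rintro (h | h)
        · exact Or.inl h
        · exact Or.inr (Or.inr h)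
      · rintro (h | rfl | h)
        · exact Or.inl h
        · exact Or.inl hm
        · exact Or.inr h
    · simp only [List.mem_cons]
      constructor
      · intro hmem
        rcases hmem with hmem | h
        · rcases (PySem.Set.mem_add _ _ _).mp hmem with h | rfl
          · exact Or.inl h
          · exact Or.inr (Or.inl rfl)
        · exact Or.inr (Or.inr h)
      · rintro (h | rfl | h)
        · exact Or.inl ((PySem.Set.mem_add _ _ _).mpr (Or.inl h))
        · exact Or.inl ((PySem.Set.mem_add _ _ _).mpr (Or.inr rfl))
        · exact Or.inr h

theorem foldB_snd_mono (L : List String) :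
    ∀ st : PySem.Set String × List String, ∀ x ∈ st.2, x ∈ (L.foldl fdStepB st).2 := by
  induction L with
  | nil => intro st x hx; exact hx
  | cons lab t ih =>
    intro st x hx
    rw [List.foldl_cons]
    rcases fdStepB_spec st lab with ⟨he, -⟩ | ⟨-, he⟩ <;> rw [he]
    · exact ih st x hx
    · exact ih _ x (List.mem_append_left _ hx)

theorem foldB_pushed_new (L : List String) :
    ∀ st : PySem.Set String × List String, ∀ x ∈ (L.foldl fdStepB st).2,
      x ∈ st.2 ∨ (x ∈ L ∧ x ∉ st.1) := by
  induction L with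
  | nil => intro st x hx; exact Or.inl hx
  | cons lab t ih =>
    intro st x hx
    rw [List.foldl_cons] at hx
    rcases fdStepB_spec st lab with ⟨he, -⟩ | ⟨hn, he⟩
    · rw [he] at hx
      rcases ih st x hx with h | ⟨h1, h2⟩
      · exact Or.inl h
      · exact Or.inr ⟨List.mem_cons_of_mem _ h1, h2⟩
    · rw [he] at hx
      rcases ih _ x hx with h | ⟨h1, h2⟩
      · rcases List.mem_append.mp h with h | h
        · exact Or.inl h
        · rw [List.mem_singleton] at h
          subst h
          exact Or.inr ⟨List.mem_cons_self .., hn⟩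
      · exact Or.inr ⟨List.mem_cons_of_mem _ h1,
          fun hx1 => h2 ((PySem.Set.mem_add _ _ _).mpr (Or.inl hx1))⟩

theorem foldB_must_push (L : List String) :
    ∀ st : PySem.Set String × List String, ∀ x ∈ L, x ∉ st.1 → x ∈ (L.foldl fdStepB st).2 := by
  induction L with
  | nil => intro st x hx; cases hx
  | cons lab t ih =>
    intro st x hxL hxs
    rw [List.foldl_cons]
    rcases fdStepB_spec st lab with ⟨he, hm⟩ | ⟨hn, he⟩ <;> rw [he]
    · rcases List.mem_cons.mp hxL with rfl | h
      · exact absurd hm hxs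
      · exact ih st x h hxs
    · rcases List.mem_cons.mp hxL with rfl | h
      · exact foldB_snd_mono t _ x (List.mem_append_right _ (List.mem_singleton_self _))
      · by_cases hxa : x ∈ PySem.Set.add st.1 lab
        · rcases (PySem.Set.mem_add _ _ _).mp hxa with h' | rfl
          · exact absurd h' hxs
          · exact foldB_snd_mono t _ _ (List.mem_append_right _ (List.mem_singleton_self _))
        · exact ih _ x h hxa

theorem foldB_phi (keys : List String) (L : List String) :
    ∀ st : PySem.Set String × List String, (∀ l ∈ L, l ∈ keys) →
      fdMissing keys (L.foldl fdStepB st).1 + (L.foldl fdStepB st).2.length ≤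
        fdMissing keys st.1 + st.2.length := by
  induction L with
  | nil => intro st _; rw [List.foldl_nil]
  | cons lab t ih =>
    intro st hL
    have hL' : ∀ l ∈ t, l ∈ keys := fun l hl => hL l (List.mem_cons_of_mem _ hl)
    rw [List.foldl_cons]
    rcases fdStepB_spec st lab with ⟨he, -⟩ | ⟨hn, he⟩ <;> rw [he]
    · exact ih st hL'
    · have h1 : fdMissing keys (PySem.Set.add st.1 lab) < fdMissing keys st.1 :=
        fdMissing_lt keys st.1 (PySem.Set.add st.1 lab)
          (fun x hx => (PySem.Set.mem_add _ _ _).mpr (Or.inl hx)) lab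
          (hL lab (List.mem_cons_self ..)) hn
          ((PySem.Set.mem_add _ _ _).mpr (Or.inr rfl))
      have h2 := ih (PySem.Set.add st.1 lab, st.2 ++ [lab]) hL'
      simp only [List.length_append, List.length_cons, List.length_nil] at h2
      omega

theorem foldB_nodup (L : List String) :
    ∀ st : PySem.Set String × List String, st.1.Nodup → (L.foldl fdStepB st).1.Nodup := by
  induction L with
  | nil => intro st h; exact h
  | cons lab t ih =>
    intro st h
    rw [List.foldl_cons]
    rcases fdStepB_spec st lab with ⟨he, -⟩ | ⟨-, he⟩ <;> rw [he]
    · exact ih st h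
    · exact ih _ (PySem.Set.nodup_add _ _ h)

-- ---- B side: facts about the worklist loop ----

theorem fdWork_eq_step (rev : PySem.Dict String (List String)) (n : Nat)
    (dirty : PySem.Set String) (d : String) (rest : List String) :
    fdWork rev (n + 1) dirty (d :: rest) =
      fdWork rev n ((rev.getD d []).foldl fdStepB (dirty, [])).1
        (((rev.getD d []).foldl fdStepB (dirty, [])).2.reverse ++ rest) := rfl

theorem fdWork_mono (rev : PySem.Dict String (List String)) :
    ∀ n (dirty : PySem.Set String) stack, ∀ x ∈ dirty, x ∈ fdWork rev n dirty stack := by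
  intro n
  induction n with
  | zero => intro dirty stack x hx; exact hx
  | succ n ih =>
    intro dirty stack x hx
    cases stack with
    | nil => exact hx
    | cons d rest =>
      rw [fdWork_eq_step]
      exact ih _ _ x ((foldB_fst_mem _ _ x).mpr (Or.inl hx))

theorem fdWork_sound (C : String → Prop) (rev : PySem.Dict String (List String))
    (hedge : ∀ d l, C d → l ∈ rev.getD d [] → C l) :
    ∀ n (dirty : PySem.Set String) stack, (∀ x ∈ dirty, C x) → (∀ x ∈ stack, C x) →
      ∀ x ∈ fdWork rev n dirty stack, C x := by
  intro n
  induction n with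
  | zero => intro dirty stack hd _ x hx; exact hd x hx
  | succ n ih =>
    intro dirty stack hd hs x hx
    cases stack with
    | nil => exact hd x hx
    | cons d rest =>
      rw [fdWork_eq_step] at hx
      refine ih _ _ ?_ ?_ x hx
      · intro y hy
        rcases (foldB_fst_mem _ _ y).mp hy with hy | hy
        · exact hd y hy
        · exact hedge d y (hs d (List.mem_cons_self ..)) hy
      · intro y hy
        rcases List.mem_append.mp hy with hy | hy
        · rw [List.mem_reverse] at hy
          rcases foldB_pushed_new _ _ y hy with h | ⟨h1, -⟩
          · cases h
          · exact hedge d y (hs d (List.mem_cons_self ..)) h1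
        · exact hs y (List.mem_cons_of_mem _ hy)

theorem fdWork_closed (keys : List String) (rev : PySem.Dict String (List String))
    (hrev : ∀ d l, l ∈ rev.getD d [] → l ∈ keys) :
    ∀ n (dirty : PySem.Set String) stack,
      stack.length + fdMissing keys dirty ≤ n →
      (∀ x ∈ dirty, x ∈ stack ∨ ∀ l ∈ rev.getD x [], l ∈ dirty) →
      ∀ x ∈ fdWork rev n dirty stack, ∀ l ∈ rev.getD x [], l ∈ fdWork rev n dirty stack := by
  intro n
  induction n with
  | zero =>
    intro dirty stack hfuel hinv x hx l hl
    have hstack : stack = [] := by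
      cases stack with
      | nil => rfl
      | cons d rest =>
        rw [List.length_cons] at hfuel
        omega
    subst hstack
    rcases hinv x hx with h | h
    · cases h
    · exact h l hl
  | succ n ih =>
    intro dirty stack hfuel hinv x hx l hl
    cases stack with
    | nil =>
      rcases hinv x hx with h | h
      · cases h
      · exact h l hl
    | cons d rest =>
      rw [fdWork_eq_step] at hx ⊢
      refine ih _ _ ?_ ?_ x hx l hl
      · have hphi := foldB_phi keys (rev.getD d []) (dirty, ([] : List String))
          (fun l' hl' => hrev d l' hl')
        rw [List.length_append, List.length_reverse]
        rw [List.length_cons] at hfuel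
        simp only [List.length_nil] at hphi
        omega
      · intro y hy
        by_cases hyd : y ∈ dirty
        · rcases hinv y hyd with hst | hcl
          · rcases List.mem_cons.mp hst with rfl | hr
            · refine Or.inr fun l' hl' => ?_
              exact (foldB_fst_mem _ _ l').mpr (Or.inr hl')
            · exact Or.inl (List.mem_append_right _ hr)
          · refine Or.inr fun l' hl' => ?_
            exact (foldB_fst_mem _ _ l').mpr (Or.inl (hcl l' hl'))
        · have hyL : y ∈ rev.getD d [] := by
            rcases (foldB_fst_mem _ _ y).mp hy with h | h
            · exact absurd h hyd
            · exact h
          exact Or.inl (List.mem_append_left _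
            (List.mem_reverse.mpr (foldB_must_push _ _ y hyL hyd)))

theorem fdWork_nodup (rev : PySem.Dict String (List String)) :
    ∀ n (dirty : PySem.Set String) stack, dirty.Nodup → (fdWork rev n dirty stack).Nodup := by
  intro n
  induction n with
  | zero => intro dirty stack h; exact h
  | succ n ih =>
    intro dirty stack h
    cases stack with
    | nil => exact h
    | cons d rest =>
      rw [fdWork_eq_step]
      exact ih _ _ (foldB_nodup _ _ h)

-- ---- the reverse index characterised ----

theorem fdRev_eq_edges (props : List (String × List (String × List String))) :
    fdRev props =
      (props.flatMap (fun lp => (fdFollows lp.2).map (fun f => (f, lp.1)))).foldl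
        (fun d p => d.modify p.1 [] (· ++ [p.2])) PySem.Dict.empty := by
  suffices h : ∀ (ps : List (String × List (String × List String)))
      (d : PySem.Dict String (List String)),
      ps.foldl (fun rev lp =>
        (fdFollows lp.2).foldl (fun rev f => rev.modify f [] (· ++ [lp.1])) rev) d =
      (ps.flatMap (fun lp => (fdFollows lp.2).map (fun f => (f, lp.1)))).foldl
        (fun d p => d.modify p.1 [] (· ++ [p.2])) d by
    exact h props PySem.Dict.empty
  intro ps
  induction ps with
  | nil => intro d; rfl
  | cons lp t ih =>
    intro d
    rw [List.foldl_cons, List.flatMap_cons, List.foldl_append, List.foldl_map, ih]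

theorem fdRev_getD_mem (props : List (String × List (String × List String))) (f l : String) :
    l ∈ (fdRev props).getD f [] ↔ ∃ lp ∈ props, lp.1 = l ∧ f ∈ fdFollows lp.2 := by
  rw [fdRev_eq_edges, PySem.Dict.getD_foldl_modify_append, PySem.Dict.getD_empty,
    List.nil_append]
  constructor
  · intro hl
    obtain ⟨p, hpf, hpl⟩ := List.mem_map.mp hl
    have hpE := (List.mem_filter.mp hpf).1
    have hpeq : p.1 = f := by simpa using (List.mem_filter.mp hpf).2
    obtain ⟨lp, hlp, hpm⟩ := List.mem_flatMap.mp hpE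
    obtain ⟨g, hg, hgp⟩ := List.mem_map.mp hpm
    refine ⟨lp, hlp, ?_, ?_⟩
    · rw [← hgp] at hpl
      exact hpl
    · rw [← hgp] at hpeq
      rw [← hpeq]
      exact hg
  · rintro ⟨lp, hlp, hl1, hf⟩
    apply List.mem_map.mpr
    refine ⟨(f, lp.1), ?_, hl1⟩
    apply List.mem_filter.mpr
    exact ⟨List.mem_flatMap.mpr ⟨lp, hlp, List.mem_map.mpr ⟨f, hf, rfl⟩⟩, by simp⟩

-- ---- nodup of the first pass ----

theorem fdFirstPass_nodup (cur sto : List (String × String)) :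
    (fdFirstPass cur sto).Nodup := by
  unfold fdFirstPass
  suffices h : ∀ (l : List (String × String)) (s : PySem.Set String), s.Nodup →
      (l.foldl (fun dirty lc =>
        match (PySem.Dict.ofList sto).get? lc.1 with
        | none => PySem.Set.add dirty lc.1
        | some stored => if stored ≠ lc.2 then PySem.Set.add dirty lc.1 else dirty) s).Nodup by
    exact h _ _ List.nodup_nil
  intro l
  induction l with
  | nil => intro s hs; exact hs
  | cons lc t ih =>
    intro s hs
    rw [List.foldl_cons]
    apply ih
    cases hg : (PySem.Dict.ofList sto).get? lc.1 with
    | none =>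
      exact PySem.Set.nodup_add _ _ hs
    | some stored =>
      simp only [hg]
      by_cases he : stored ≠ lc.2
      · rw [if_pos he]
        exact PySem.Set.nodup_add _ _ hs
      · rw [if_neg he]
        exact hs

-- ===== VERDICT (by name: the statement is the Claim_ definition above) =====
theorem find_dirty_py_spec : Claim_equal_find_dirty_py := by
  unfold Claim_equal_find_dirty_py
  intro cur sto deps _
  unfold Spec_find_dirty_py find_dirty_py find_dirty_py_alt
  show PySem.List.sorted
      (fdLoop (fdProps deps) ((fdProps deps).length + 1) (fdFirstPass cur sto)) (fun x => x) false
    = PySem.List.sorted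
      (fdWork (fdRev (fdProps deps))
        ((fdInit cur sto).2.length + (fdProps deps).length + 1)
        (fdInit cur sto).1 (fdInit cur sto).2) (fun x => x) false
  have hstep : ∀ lp ∈ fdProps deps,
      (∃ f ∈ fdFollows lp.2, FdCl (fdFirstPass cur sto) (fdProps deps) f) →
      FdCl (fdFirstPass cur sto) (fdProps deps) lp.1 := by
    rintro lp hlp ⟨f, hf, hc⟩
    exact FdCl.step hlp hf hc
  have hA1 : ∀ x ∈ fdLoop (fdProps deps) ((fdProps deps).length + 1) (fdFirstPass cur sto),
      FdCl (fdFirstPass cur sto) (fdProps deps) x :=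
    fdLoop_sound _ (fdProps deps) hstep _ (fdFirstPass cur sto) (fun _ hx => FdCl.base hx)
  have hA2 : ∀ x, FdCl (fdFirstPass cur sto) (fdProps deps) x →
      x ∈ fdLoop (fdProps deps) ((fdProps deps).length + 1) (fdFirstPass cur sto) := by
    intro x hx
    induction hx with
    | base h => exact fdLoop_mono _ _ _ _ h
    | step hlp hf _ ihf =>
      rcases fdLoop_closed (fdProps deps) (fdProps deps).length (fdFirstPass cur sto)
          (by simpa using fdMissing_le ((fdProps deps).map Prod.fst) (fdFirstPass cur sto))
          _ hlp with h | h
      · exact h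
      · exact absurd ihf (h _ hf)
  have hrevkeys : ∀ d l, l ∈ (fdRev (fdProps deps)).getD d [] →
      l ∈ (fdProps deps).map Prod.fst := by
    intro d l hl
    obtain ⟨lp, hlp, hl1, -⟩ := (fdRev_getD_mem (fdProps deps) d l).mp hl
    exact List.mem_map.mpr ⟨lp, hlp, hl1⟩
  have hedge : ∀ d l, FdCl (fdFirstPass cur sto) (fdProps deps) d →
      l ∈ (fdRev (fdProps deps)).getD d [] →
      FdCl (fdFirstPass cur sto) (fdProps deps) l := by
    intro d l hc hl
    obtain ⟨lp, hlp, hl1, hf⟩ := (fdRev_getD_mem (fdProps deps) d l).mp hl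
    rw [← hl1]
    exact FdCl.step hlp hf hc
  have hIfst := fdInit_fst cur sto
  have hImem := fdInit_mem_iff cur sto
  have hB1 : ∀ x ∈ fdWork (fdRev (fdProps deps))
      ((fdInit cur sto).2.length + (fdProps deps).length + 1)
      (fdInit cur sto).1 (fdInit cur sto).2,
      FdCl (fdFirstPass cur sto) (fdProps deps) x := by
    apply fdWork_sound _ _ hedge
    · intro x hx
      refine FdCl.base ?_
      rw [← hIfst]
      exact hx
    · intro x hx
      refine FdCl.base ?_
      rw [← hIfst]
      exact (hImem x).mpr hx
  have hBclosed := fdWork_closed ((fdProps deps).map Prod.fst) (fdRev (fdProps deps)) hrevkeys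
      ((fdInit cur sto).2.length + (fdProps deps).length + 1)
      (fdInit cur sto).1 (fdInit cur sto).2
      (by have := fdMissing_le ((fdProps deps).map Prod.fst) (fdInit cur sto).1
          simp only [List.length_map] at this
          omega)
      (fun x hx => Or.inl ((hImem x).mp hx))
  have hB2 : ∀ x, FdCl (fdFirstPass cur sto) (fdProps deps) x →
      x ∈ fdWork (fdRev (fdProps deps))
        ((fdInit cur sto).2.length + (fdProps deps).length + 1)
        (fdInit cur sto).1 (fdInit cur sto).2 := by
    intro x hx
    induction hx with
    | base h =>
      refine fdWork_mono _ _ _ _ _ ?_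
      rw [hIfst]
      exact h
    | step hlp hf _ ihf =>
      exact hBclosed _ ihf _ ((fdRev_getD_mem _ _ _).mpr ⟨_, hlp, rfl, hf⟩)
  have hnodA := fdLoop_nodup (fdProps deps) ((fdProps deps).length + 1) (fdFirstPass cur sto)
    (fdFirstPass_nodup cur sto)
  have hnodB := fdWork_nodup (fdRev (fdProps deps))
    ((fdInit cur sto).2.length + (fdProps deps).length + 1) (fdInit cur sto).1 (fdInit cur sto).2
    (by rw [hIfst]; exact fdFirstPass_nodup cur sto)
  exact PySem.List.sorted_eq_sorted_of_perm _ _ _ (fun a b h => h)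
    ((List.perm_ext_iff_of_nodup hnodA hnodB).mpr
      (fun a => ⟨fun h => hB2 a (hA1 a h), fun h => hA2 a (hB1 a h)⟩))
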